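-- pv_equiv track=rewrite | github.com/Cosmochrony/simulation | spectral/o7/SpectralO7.py | lps_generators
-- ===== SOURCE A (Python) =====
-- def mod_sqrt_neg1(q):
--     for x in range(q):
--         if (x * x + 1) % q == 0:
--             return x
--     return None
--
-- def lps_generators(p, q):
--     i_q = mod_sqrt_neg1(q)
--     if i_q is None:
--         raise ValueError(f"q={q} has no sqrt(-1)")
--     solutions = []
--     rng = range(-(p + 1), p + 2)
--     for a0 in rng:
--         for a1 in rng:
--             for a2 in rng:
--                 for a3 in rng:
--                     if (a0*a0 + a1*a1 + a2*a2 + a3*a3 == p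
--                             and a0 > 0 and a0 % 2 == 1
--                             and a1 % 2 == 0 and a2 % 2 == 0 and a3 % 2 == 0):
--                         solutions.append((a0, a1, a2, a3))
--     gens = []
--     for (a0, a1, a2, a3) in solutions:
--         m00 = (a0 + a1 * i_q) % q
--         m01 = (a2 + a3 * i_q) % q
--         m10 = (-a2 + a3 * i_q) % q
--         m11 = (a0 - a1 * i_q) % q
--         gens.append(((m00, m01), (m10, m11)))
--     return gens
-- ===== SOURCE B (Python) =====
-- def mod_sqrt_neg1(q):
--     for x in range(q):
--         if (x * x + 1) % q == 0:
--             return x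
--     return None
--
-- def lps_generators(p, q):
--     i_q = mod_sqrt_neg1(q)
--     if i_q is None:
--         raise ValueError(f"q={q} has no sqrt(-1)")
--     # hash index of even perfect squares: drops A's innermost a3-scan
--     sq = {}
--     for a in range(0, p + 2, 2):
--         sq[a * a] = a
--     gens = []
--     rng = range(-(p + 1), p + 2)
--     for a0 in rng:
--         if a0 > 0 and a0 % 2 == 1:
--             for a1 in rng:
--                 if a1 % 2 == 0:
--                     for a2 in rng:
--                         if a2 % 2 == 0:
--                             s = sq.get(p - a0 * a0 - a1 * a1 - a2 * a2)
--                             if s is not None: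
--                                 for a3 in ((0,) if s == 0 else (-s, s)):
--                                     m00 = (a0 + a1 * i_q) % q
--                                     m01 = (a2 + a3 * i_q) % q
--                                     m10 = (-a2 + a3 * i_q) % q
--                                     m11 = (a0 - a1 * i_q) % q
--                                     gens.append(((m00, m01), (m10, m11)))
--     return gens
-- ===== Notes on version B (the rewrite author's own statement) =====
-- stated objective: faster
-- what changed: B drops A's innermost a3-loop: it builds a dict mapping each even perfect square to its nonnegative root once, and for every (a0,a1,a2) looks up the remainder p-a0^2-a1^2-a2^2 in it, emitting -s then s (A's iteration order); matrices are emitted in the same pass instead of via an intermediate solutions list. Intended as faster (one loop level removed); measured: A timed out at size 16 where B returned, so no ratio could be taken.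
import Mathlib
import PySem

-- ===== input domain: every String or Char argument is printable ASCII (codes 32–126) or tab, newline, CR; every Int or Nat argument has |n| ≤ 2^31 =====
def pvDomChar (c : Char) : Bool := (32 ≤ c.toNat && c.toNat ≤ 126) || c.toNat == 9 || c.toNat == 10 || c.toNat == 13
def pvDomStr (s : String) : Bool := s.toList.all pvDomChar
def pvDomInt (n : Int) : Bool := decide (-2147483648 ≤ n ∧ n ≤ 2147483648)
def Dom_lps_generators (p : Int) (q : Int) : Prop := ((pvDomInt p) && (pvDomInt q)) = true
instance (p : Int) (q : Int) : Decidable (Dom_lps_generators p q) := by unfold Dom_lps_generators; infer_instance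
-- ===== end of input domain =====

-- B replaces A's innermost a3-scan by a one-shot hash index of even perfect squares; intended as faster
-- (measured: A timed out at size 16 where B still returned; no clean ratio could be taken).

-- ===== PORT A =====
-- helper shared by both Pythons: first x in range(q) with (x*x+1) % q == 0
def mod_sqrt_neg1 (q : Int) : Option Int :=
  (PySem.List.pyRange 0 q 1).find? (fun x => PySem.Int.mod (x * x + 1) q == 0)

def lps_generators (p : Int) (q : Int) : List ((Int × Int) × (Int × Int)) :=
  match mod_sqrt_neg1 q with
  | none => []   -- Python raises ValueError here; excluded by Pre_
  | some iq =>
    let rng := PySem.List.pyRange (-(p + 1)) (p + 2) 1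
    let solutions : List (Int × Int × Int × Int) :=
      rng.foldl (fun acc a0 =>
        rng.foldl (fun acc a1 =>
          rng.foldl (fun acc a2 =>
            rng.foldl (fun acc a3 =>
              if a0*a0 + a1*a1 + a2*a2 + a3*a3 = p ∧ 0 < a0 ∧ PySem.Int.mod a0 2 = 1 ∧
                 PySem.Int.mod a1 2 = 0 ∧ PySem.Int.mod a2 2 = 0 ∧ PySem.Int.mod a3 2 = 0
              then acc ++ [(a0, a1, a2, a3)] else acc) acc) acc) acc) []
    solutions.foldl (fun acc s =>
      acc ++ [((PySem.Int.mod (s.1 + s.2.1 * iq) q, PySem.Int.mod (s.2.2.1 + s.2.2.2 * iq) q),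
               (PySem.Int.mod (-s.2.2.1 + s.2.2.2 * iq) q, PySem.Int.mod (s.1 - s.2.1 * iq) q))]) []

-- ===== PORT B =====
def lps_generators_alt (p : Int) (q : Int) : List ((Int × Int) × (Int × Int)) :=
  match mod_sqrt_neg1 q with
  | none => []   -- Python raises ValueError here; excluded by Pre_
  | some iq =>
    let sq : PySem.Dict Int Int :=
      (PySem.List.pyRange 0 (p + 2) 2).foldl (fun d a => d.insert (a * a) a) PySem.Dict.empty
    let rng := PySem.List.pyRange (-(p + 1)) (p + 2) 1
    rng.foldl (fun acc a0 =>
      if 0 < a0 ∧ PySem.Int.mod a0 2 = 1 then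
        rng.foldl (fun acc a1 =>
          if PySem.Int.mod a1 2 = 0 then
            rng.foldl (fun acc a2 =>
              if PySem.Int.mod a2 2 = 0 then
                match sq.get? (p - a0*a0 - a1*a1 - a2*a2) with
                | none => acc
                | some s =>
                  (if s = 0 then [(0 : Int)] else [-s, s]).foldl (fun acc a3 =>
                    acc ++ [((PySem.Int.mod (a0 + a1 * iq) q, PySem.Int.mod (a2 + a3 * iq) q),
                             (PySem.Int.mod (-a2 + a3 * iq) q, PySem.Int.mod (a0 - a1 * iq) q))]) acc
              else acc) acc
          else acc) acc
      else acc) []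

-- ===== PRECONDITION & SPEC =====
-- Pre_ excludes exactly the q for which mod_sqrt_neg1 returns None (-1 has no square root mod q),
-- where the Python A raises ValueError; stated in closed form: q >= 1 and every divisor of q is
-- 1 or 2 mod 4 (each divisor or its cofactor is below min(46342, q+1), and 46342^2 > 2^31 >= q on Dom).
def Pre_lps_generators (p : Int) (q : Int) : Prop :=
  1 ≤ q ∧ ∀ d < min 46342 (q.toNat + 1), d ∣ q.toNat →
    (d % 4 = 1 ∨ d % 4 = 2) ∧ ((q.toNat / d) % 4 = 1 ∨ (q.toNat / d) % 4 = 2)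
instance (p : Int) (q : Int) : Decidable (Pre_lps_generators p q) := by unfold Pre_lps_generators; infer_instance
def pvWitness_lps_generators : Int × Int := (5, 2)

def Spec_lps_generators (p : Int) (q : Int) (out : List ((Int × Int) × (Int × Int))) : Prop := out = lps_generators_alt p q
instance (p : Int) (q : Int) (out : List ((Int × Int) × (Int × Int))) : Decidable (Spec_lps_generators p q out) := by unfold Spec_lps_generators; infer_instance

-- ===== CLAIM (what is proved, stated in full; the proofs are below) =====
def Claim_equal_lps_generators : Prop := ∀ (p : Int) (q : Int), Dom_lps_generators p q → Pre_lps_generators p q → Spec_lps_generators p q (lps_generators p q)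

-- ===== LEMMAS AND PROOFS =====

-- lookup in the squares dict: a hit names an element of the builder list with that square
theorem get?_foldl_insSq_some (l : List Int) (d : PySem.Dict Int Int) (r s : Int)
    (h : (l.foldl (fun d a => d.insert (a * a) a) d).get? r = some s) :
    (s ∈ l ∧ s * s = r) ∨ d.get? r = some s := by
  induction l generalizing d with
  | nil => exact Or.inr h
  | cons a t ih =>
    rcases ih (d.insert (a * a) a) h with h1 | h2
    · exact Or.inl ⟨List.mem_cons_of_mem _ h1.1, h1.2⟩
    · by_cases hr : r = a * a
      · subst hr
        rw [PySem.Dict.get?_insert_self] at h2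
        have : a = s := Option.some_inj.mp h2
        subst this
        exact Or.inl ⟨List.mem_cons_self, rfl⟩
      · rw [PySem.Dict.get?_insert, if_neg hr] at h2
        exact Or.inr h2

-- a miss means no element of the builder list has that square
theorem get?_foldl_insSq_none_iff (l : List Int) (r : Int) :
    ((l.foldl (fun d a => d.insert (a * a) a) PySem.Dict.empty).get? r = none) ↔ ∀ a ∈ l, a * a ≠ r := by
  rw [PySem.Dict.get?_eq_none_iff_not_mem_keys,
      PySem.Dict.keys_foldl_insert_key l (fun a => a * a) (fun _ a => a) PySem.Dict.empty]
  have : (PySem.Dict.empty : PySem.Dict Int Int).keys = [] := rfl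
  rw [this, PySem.Set.update_nil_left]
  simp only [PySem.Set.mem_ofList, List.mem_map]
  constructor
  · intro h a ha he; exact h ⟨a, ha, he⟩
  · rintro h ⟨a, ha, he⟩; exact h a ha he

-- matrix entry built from one solution
def pvGmat (iq q a0 a1 a2 a3 : Int) : (Int × Int) × (Int × Int) :=
  ((PySem.Int.mod (a0 + a1 * iq) q, PySem.Int.mod (a2 + a3 * iq) q),
   (PySem.Int.mod (-a2 + a3 * iq) q, PySem.Int.mod (a0 - a1 * iq) q))

-- the canonical list of a3 with a3*a3 = r, a3 even, drawn from A's symmetric range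
theorem filter_sq_eq (p r s : Int) (hs0 : 0 ≤ s) (hsp : s < p + 2) (hr : s * s = r)
    (he : PySem.Int.mod s 2 = 0) :
    (PySem.List.pyRange (-(p + 1)) (p + 2) 1).filter
        (fun x => decide (x * x = r ∧ PySem.Int.mod x 2 = 0)) =
      (if s = 0 then [(0 : Int)] else [-s, s]) := by
  have h2 : (2 : Int) ∣ s := (PySem.Int.mod_eq_zero_iff_dvd s 2).mp he
  refine List.eq_of_perm_of_sorted (le := (· < ·)) (fun a b _ _ h1 h2 => by omega)
    ((PySem.List.pairwise_lt_pyRange_one _ _).filter _) ?_ ?_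
  · split
    · simp
    · simp only [List.pairwise_cons, List.mem_singleton]
      exact ⟨fun a' ha => by omega, by simp, List.Pairwise.nil⟩
  · refine (List.perm_ext_iff_of_nodup ((PySem.List.nodup_pyRange_one _ _).filter _) ?_).mpr ?_
    · split
      · simp
      · simp; omega
    · intro x
      simp only [List.mem_filter, PySem.List.mem_pyRange_one, decide_eq_true_eq]
      constructor
      · rintro ⟨⟨hlo, hhi⟩, hxx, hxe⟩
        have : x = s ∨ x = -s := by
          rcases mul_self_eq_mul_self_iff.mp (hxx.trans hr.symm) with h | h
          · exact Or.inl h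
          · exact Or.inr h
        split
        · rename_i h0; subst h0; simp; omega
        · rename_i h0
          rcases this with h | h <;> simp [h]
      · intro hx
        split at hx
        · rename_i h0; subst h0
          simp only [List.mem_singleton] at hx; subst hx
          refine ⟨⟨by omega, by omega⟩, by simpa using hr, by decide⟩
        · rename_i h0
          have heq : PySem.Int.mod (-s) 2 = 0 :=
            (PySem.Int.mod_eq_zero_iff_dvd (-s) 2).mpr (dvd_neg.mpr h2)
          simp only [List.mem_cons, List.not_mem_nil, or_false] at hx
          rcases hx with h | h <;> subst h
          · exact ⟨⟨by omega, by omega⟩, by rw [neg_mul_neg]; exact hr, heq⟩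
          · exact ⟨⟨by omega, by omega⟩, hr, he⟩

theorem filter_sq_nil (p r : Int)
    (h : ∀ a ∈ PySem.List.pyRange 0 (p + 2) 2, a * a ≠ r) :
    (PySem.List.pyRange (-(p + 1)) (p + 2) 1).filter
        (fun x => decide (x * x = r ∧ PySem.Int.mod x 2 = 0)) = [] := by
  rw [List.filter_eq_nil_iff]
  intro x hx hcond
  simp only [decide_eq_true_eq] at hcond
  obtain ⟨hxx, hxe⟩ := hcond
  rw [PySem.List.mem_pyRange_one] at hx
  have h2 : (2 : Int) ∣ x := (PySem.Int.mod_eq_zero_iff_dvd x 2).mp hxe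
  by_cases h0 : 0 ≤ x
  · exact h x ((PySem.List.mem_pyRange_iff_of_pos (by norm_num) x).mpr
      ⟨h0, hx.2, by simpa using h2⟩) hxx
  · refine h (-x) ((PySem.List.mem_pyRange_iff_of_pos (by norm_num) (-x)).mpr
      ⟨by omega, by omega, by simpa using dvd_neg.mpr h2⟩) ?_
    rw [neg_mul_neg]; exact hxx

-- loop-body shapes of B: pull the accumulator out of the branch
theorem pv_match_acc {β : Type} (o : Option Int) (acc : List β) (h : Int → List β) :
    (match o with | none => acc | some s => acc ++ h s) =
      acc ++ (match o with | none => [] | some s => h s) := by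
  cases o <;> simp

theorem pv_if_acc {β : Type} (P : Prop) [Decidable P] (acc X : List β) :
    (if P then acc ++ X else acc) = acc ++ (if P then X else []) := by
  split <;> simp

theorem pv_flatMap_ite_singleton {α β : Type} (p : α → Prop) [DecidablePred p] (f : α → β)
    (l : List α) :
    l.flatMap (fun x => if p x then [f x] else []) = (l.filter (fun x => decide (p x))).map f := by
  induction l with
  | nil => rfl
  | cons a t ih =>
    simp only [List.flatMap_cons, List.filter_cons, ih]
    by_cases h : p a <;> simp [h]

theorem pv_map_ite_sing {α β : Type} (g : α → β) (P : Prop) [Decidable P] (t : α) :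
    List.map g (if P then [t] else []) = if P then [g t] else [] := by
  split <;> simp

theorem lps_generators_eq_alt (p q : Int) : lps_generators p q = lps_generators_alt p q := by
  unfold lps_generators lps_generators_alt
  cases hiq : mod_sqrt_neg1 q with
  | none => rfl
  | some iq =>
    dsimp only
    simp only [pv_match_acc, pv_if_acc, PySem.List.foldl_append_singleton_eq_map,
      PySem.List.foldl_append_eq_flatMap, List.nil_append, List.map_flatMap,
      pv_map_ite_sing]
    congr 1
    funext a0
    by_cases hP0 : 0 < a0 ∧ PySem.Int.mod a0 2 = 1
    case neg =>
      rw [if_neg hP0, List.flatMap_eq_nil_iff]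
      intro a1 _
      rw [List.flatMap_eq_nil_iff]; intro a2 _
      rw [List.flatMap_eq_nil_iff]; intro a3 _
      rw [if_neg]; rintro ⟨-, h1, h2, -⟩; exact hP0 ⟨h1, h2⟩
    case pos =>
      rw [if_pos hP0]
      congr 1
      funext a1
      by_cases hP1 : PySem.Int.mod a1 2 = 0
      case neg =>
        rw [if_neg hP1, List.flatMap_eq_nil_iff]
        intro a2 _
        rw [List.flatMap_eq_nil_iff]; intro a3 _
        rw [if_neg]; rintro ⟨-, -, -, h1, -⟩; exact hP1 h1
      case pos =>
        rw [if_pos hP1]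
        congr 1
        funext a2
        by_cases hP2 : PySem.Int.mod a2 2 = 0
        case neg =>
          rw [if_neg hP2, List.flatMap_eq_nil_iff]
          intro a3 _
          rw [if_neg]; rintro ⟨-, -, -, -, h1, -⟩; exact hP2 h1
        case pos =>
          rw [if_pos hP2, pv_flatMap_ite_singleton]
          have hcong : ∀ x ∈ PySem.List.pyRange (-(p + 1)) (p + 2) 1,
              (decide (a0 * a0 + a1 * a1 + a2 * a2 + x * x = p ∧ 0 < a0 ∧
                PySem.Int.mod a0 2 = 1 ∧ PySem.Int.mod a1 2 = 0 ∧
                PySem.Int.mod a2 2 = 0 ∧ PySem.Int.mod x 2 = 0)) =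
              (fun a3 => decide (a3 * a3 = p - a0 * a0 - a1 * a1 - a2 * a2 ∧
                PySem.Int.mod a3 2 = 0)) x := by
            intro x _
            apply decide_eq_decide.mpr
            constructor
            · rintro ⟨hsum, -, -, -, -, he⟩; exact ⟨by linarith, he⟩
            · rintro ⟨hsq, he⟩; exact ⟨by linarith, hP0.1, hP0.2, hP1, hP2, he⟩
          rw [List.filter_congr hcong]
          cases hg : (List.foldl (fun d a => d.insert (a * a) a) PySem.Dict.empty
              (PySem.List.pyRange 0 (p + 2) 2)).get? (p - a0 * a0 - a1 * a1 - a2 * a2) with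
          | none =>
            rw [filter_sq_nil p _ ((get?_foldl_insSq_none_iff _ _).mp hg)]
            simp
          | some s =>
            rcases get?_foldl_insSq_some _ _ _ _ hg with ⟨hmem, hss⟩ | hemp
            · rw [PySem.List.mem_pyRange_iff_of_pos (by norm_num)] at hmem
              obtain ⟨h0, hlt, hdvd⟩ := hmem
              rw [filter_sq_eq p _ s h0 hlt hss
                ((PySem.Int.mod_eq_zero_iff_dvd s 2).mpr (by simpa using hdvd))]
            · rw [PySem.Dict.get?_empty] at hemp; cases hemp

-- ===== VERDICT (by name: the statement is the Claim_ definition above) =====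
theorem lps_generators_spec : Claim_equal_lps_generators := by
  intro p q _ _
  unfold Spec_lps_generators
  exact lps_generators_eq_alt p q
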